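-- pv_equiv track=rewrite | github.com/Chandravo/CodeChef | SALARY.py | func
-- ===== SOURCE A (Python) =====
-- def check_same(l):
--     t=l[0]
--     ret=1
--     for i in l:
--         if i!=t:
--             ret-=1
--             break
--     return ret
--
-- def func(l):
--     h=1
--     turns=0
--     while(check_same(l)==0):
--         turns+=1
--         h=0
--         maxe=l.index(max(l))
--         for i in range (len(l)):
--             if i!=maxe:
--                 l[i]+=1
--     return turns
-- ===== SOURCE B (Python) =====
-- def func(l):
--     m = min(l)
--     return sum(l) - len(l) * m
-- ===== Notes on version B (the rewrite author's own statement) =====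
-- stated objective: faster
-- what changed: Replaced the simulation loop (repeatedly incrementing all elements except the max until all are equal) by the closed form sum(l) - len(l)*min(l), computed in one pass; note A mutates l in place while B does not (return value equivalence only).
import Mathlib
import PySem

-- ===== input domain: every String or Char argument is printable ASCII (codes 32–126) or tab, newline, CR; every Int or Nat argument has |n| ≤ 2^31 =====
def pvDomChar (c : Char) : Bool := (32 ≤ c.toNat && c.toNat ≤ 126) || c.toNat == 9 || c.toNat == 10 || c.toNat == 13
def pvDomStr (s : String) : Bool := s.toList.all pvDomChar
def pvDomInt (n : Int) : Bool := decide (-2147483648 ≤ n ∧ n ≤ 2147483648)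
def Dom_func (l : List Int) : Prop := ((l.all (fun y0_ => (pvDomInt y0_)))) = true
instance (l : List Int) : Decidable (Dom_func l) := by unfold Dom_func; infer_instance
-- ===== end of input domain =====

-- B replaces A's turn-by-turn simulation with the closed form sum(l) - len(l)*min(l) (one pass);
-- A mutates its argument in place, B does not: the equivalence proved here is about the RETURN value only.

-- ===== PORT A =====
-- for-loop of check_same: ret starts at 1, first mismatch does 'ret-=1; break'
def checkLoop (t : Int) : List Int → Int
  | [] => 1
  | i :: rest => if i ≠ t then 1 - 1 else checkLoop t rest

def checkSame (l : List Int) : Int :=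
  match PySem.List.pyGet? l 0 with
  | none => 1      -- indexing the first element of empty l raises IndexError in Python; outside Pre_
  | some t => checkLoop t l

-- 'for i in range(len(l)): if i != maxe: l[i] += 1', as structural recursion with index counter i
def incrExcept (maxe : Nat) : Nat → List Int → List Int
  | _, [] => []
  | i, x :: xs => (if i ≠ maxe then x + 1 else x) :: incrExcept maxe (i + 1) xs

-- proof/termination helper: min of a nonempty list as Python's min computes it
def minHead : List Int → Int
  | [] => 0
  | x :: xs => xs.foldl min x

-- termination measure for A's while loop
def meas (l : List Int) : Nat := (l.sum - l.length * minHead l).toNat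

-- ----- lemmas the port needs for termination (cited by decreasing_by) -----
lemma length_incrExcept (maxe i : Nat) (l : List Int) :
    (incrExcept maxe i l).length = l.length := by
  induction l generalizing i with
  | nil => rfl
  | cons x xs ih => simp [incrExcept, ih]

lemma getElem_incrExcept (maxe i : Nat) (l : List Int) (k : Nat) (hk : k < l.length) :
    (incrExcept maxe i l)[k]'(by rw [length_incrExcept]; exact hk) =
      if i + k = maxe then l[k] else l[k] + 1 := by
  induction l generalizing i k with
  | nil => simp at hk
  | cons x xs ih =>
    cases k with
    | zero =>
      simp only [incrExcept, List.getElem_cons_zero, Nat.add_zero]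
      split_ifs <;> first | rfl | omega
    | succ k' =>
      have h' := ih (i + 1) k' (by simpa using hk)
      rw [show i + (k' + 1) = i + 1 + k' by omega]
      simpa [incrExcept] using h'

lemma sum_incrExcept_out (maxe : Nat) (l : List Int) (i : Nat)
    (h : maxe < i ∨ i + l.length ≤ maxe) :
    (incrExcept maxe i l).sum = l.sum + l.length := by
  induction l generalizing i with
  | nil => simp [incrExcept]
  | cons x xs ih =>
    have hne : i ≠ maxe := by simp at h ⊢; omega
    have h' := ih (i + 1) (by simp at h ⊢; omega)
    simp [incrExcept, hne, h']
    ring_nf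

lemma sum_incrExcept_in (maxe : Nat) (l : List Int) (i : Nat)
    (h1 : i ≤ maxe) (h2 : maxe < i + l.length) :
    (incrExcept maxe i l).sum = l.sum + l.length - 1 := by
  induction l generalizing i with
  | nil => simp at h2; omega
  | cons x xs ih =>
    by_cases he : i = maxe
    · have h' := sum_incrExcept_out maxe xs (i + 1) (by omega)
      simp only [incrExcept, if_neg (show ¬ i ≠ maxe from by omega), List.sum_cons, h',
        List.length_cons]
      push_cast
      ring
    · have h' := ih (i + 1) (by omega) (by simp at h2 ⊢; omega)
      simp only [incrExcept, if_pos (show i ≠ maxe from he), List.sum_cons, h',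
        List.length_cons]
      push_cast
      ring

lemma minHead_le (l : List Int) (y : Int) (hy : y ∈ l) : minHead l ≤ y := by
  cases l with
  | nil => simp at hy
  | cons x xs =>
    rcases List.mem_cons.mp hy with rfl | hy
    · exact (PySem.List.foldl_min_le xs y).1
    · exact (PySem.List.foldl_min_le xs x).2 y hy

lemma minHead_mem (l : List Int) (hne : l ≠ []) : minHead l ∈ l := by
  cases l with
  | nil => exact absurd rfl hne
  | cons x xs =>
    rcases PySem.List.foldl_min_mem xs x with h | h
    · simp [minHead, h]
    · simp [minHead]; right; exact h

lemma minHead_eq (l : List Int) (c : Int) (hc : ∀ y ∈ l, c ≤ y) (hm : c ∈ l) :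
    minHead l = c := by
  have h1 : minHead l ≤ c := minHead_le l c hm
  have h2 : c ≤ minHead l := hc _ (minHead_mem l (by rintro rfl; simp at hm))
  omega

lemma sum_lower (l : List Int) (c : Int) (hc : ∀ y ∈ l, c ≤ y) :
    (l.length : Int) * c ≤ l.sum := by
  induction l with
  | nil => simp
  | cons x xs ih =>
    have := ih (fun y hy => hc y (List.mem_cons_of_mem _ hy))
    have hx := hc x (List.mem_cons_self)
    simp only [List.sum_cons, List.length_cons]
    push_cast
    nlinarith

lemma sum_lower_strict (l : List Int) (c : Int) (hc : ∀ y ∈ l, c ≤ y)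
    (y0 : Int) (hy0 : y0 ∈ l) (hlt : c + 1 ≤ y0) :
    (l.length : Int) * c + 1 ≤ l.sum := by
  induction l with
  | nil => simp at hy0
  | cons x xs ih =>
    rcases List.mem_cons.mp hy0 with rfl | hy0
    · have := sum_lower xs c (fun y hy => hc y (List.mem_cons_of_mem _ hy))
      simp only [List.sum_cons, List.length_cons]
      push_cast
      nlinarith
    · have := ih (fun y hy => hc y (List.mem_cons_of_mem _ hy)) hy0
      have hx := hc x (List.mem_cons_self)
      simp only [List.sum_cons, List.length_cons]
      push_cast
      nlinarith

lemma checkLoop_eq_zero (t : Int) (l : List Int) (h : checkLoop t l = 0) :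
    ∃ y ∈ l, y ≠ t := by
  induction l with
  | nil => simp [checkLoop] at h
  | cons x xs ih =>
    by_cases hx : x = t
    · simp [checkLoop, hx] at h
      obtain ⟨y, hy, hyt⟩ := ih h
      exact ⟨y, List.mem_cons_of_mem _ hy, hyt⟩
    · exact ⟨x, List.mem_cons_self, hx⟩

lemma checkSame_nil : checkSame [] = 1 := rfl

-- the step of A's loop: sum, min and measure of the updated list
lemma step_facts (l : List Int) (hcs : checkSame l = 0) (mx : Int) (maxe : Nat)
    (hm : PySem.List.max? l (fun x => x) = some mx)
    (hi : PySem.List.index? l mx = some maxe) :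
    minHead (incrExcept maxe 0 l) = minHead l + 1 ∧
    (incrExcept maxe 0 l).sum = l.sum + l.length - 1 ∧
    1 ≤ l.sum - l.length * minHead l := by
  cases l with
  | nil => simp [checkSame_nil] at hcs
  | cons x xs =>
    have hcl : checkLoop x (x :: xs) = 0 := by
      simpa [checkSame, PySem.List.pyGet?_zero_cons] using hcs
    obtain ⟨y, hy, hyt⟩ := checkLoop_eq_zero x _ hcl
    have hmax : ∀ z ∈ x :: xs, z ≤ mx := fun z hz => PySem.List.max?_isMax hm z hz
    have hmxmem : mx ∈ x :: xs := PySem.List.max?_mem hm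
    have hminle : ∀ z ∈ x :: xs, minHead (x :: xs) ≤ z := fun z hz => minHead_le _ z hz
    have hmmem : minHead (x :: xs) ∈ x :: xs := minHead_mem _ (by simp)
    have hlt : minHead (x :: xs) + 1 ≤ mx := by
      by_contra hcon
      have hall : ∀ z ∈ x :: xs, z = minHead (x :: xs) := fun z hz =>
        le_antisymm (le_trans (hmax z hz) (by omega)) (hminle z hz)
      have e1 := hall y hy
      have e2 := hall x List.mem_cons_self
      exact hyt (by omega)
    obtain ⟨hkl, hval, -⟩ := PySem.List.getElem_of_index?_eq_some hi
    have hlen := length_incrExcept maxe 0 (x :: xs)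
    have hnew_lb : ∀ z ∈ incrExcept maxe 0 (x :: xs), minHead (x :: xs) + 1 ≤ z := by
      intro z hz
      obtain ⟨k, hk, hzk⟩ := List.mem_iff_getElem.mp hz
      have hk' : k < (x :: xs).length := by omega
      rw [getElem_incrExcept maxe 0 (x :: xs) k hk'] at hzk
      by_cases hke : 0 + k = maxe
      · have : k = maxe := by omega
        subst this
        rw [if_pos hke, hval] at hzk
        omega
      · rw [if_neg hke] at hzk
        have := hminle _ (List.getElem_mem hk')
        omega
    obtain ⟨j, hj, hjv⟩ := List.mem_iff_getElem.mp hmmem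
    have hjne : ¬ (0 + j = maxe) := by
      intro h0
      have : j = maxe := by omega
      subst this
      rw [hval] at hjv
      omega
    have hmem1 : minHead (x :: xs) + 1 ∈ incrExcept maxe 0 (x :: xs) := by
      rw [List.mem_iff_getElem]
      refine ⟨j, by omega, ?_⟩
      rw [getElem_incrExcept maxe 0 (x :: xs) j hj, if_neg hjne, hjv]
    refine ⟨minHead_eq _ _ hnew_lb hmem1,
      sum_incrExcept_in maxe (x :: xs) 0 (by omega) (by simpa using hkl), ?_⟩
    have hs := sum_lower_strict (x :: xs) (minHead (x :: xs)) hminle mx hmxmem hlt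
    linarith

lemma meas_decrease (l : List Int) (hcs : checkSame l = 0) (mx : Int) (maxe : Nat)
    (hm : PySem.List.max? l (fun x => x) = some mx)
    (hi : PySem.List.index? l mx = some maxe) :
    meas (incrExcept maxe 0 l) < meas l := by
  obtain ⟨h1, h2, h3⟩ := step_facts l hcs mx maxe hm hi
  unfold meas
  rw [h1, h2, length_incrExcept]
  have hr : (l.length : Int) * (minHead l + 1) = l.length * minHead l + l.length := by ring
  omega

-- the while loop of A, turns/h as accumulators; terminates because meas strictly decreases
def funcLoop (l : List Int) (hv turns : Int) : Int :=
  if hcs : checkSame l = 0 then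
    match hm : PySem.List.max? l (fun x => x) with
    | none => turns + 1      -- unreachable: checkSame l = 0 forces l ≠ []
    | some mx =>
      match hi : PySem.List.index? l mx with
      | none => turns + 1    -- unreachable: mx ∈ l
      | some maxe => funcLoop (incrExcept maxe 0 l) 0 (turns + 1)
  else turns
termination_by meas l
decreasing_by exact meas_decrease l hcs _ _ hm hi

def func (l : List Int) : Int := funcLoop l 1 0

-- ===== PORT B =====
def func_alt (l : List Int) : Int :=
  match PySem.List.min? l (fun x => x) with
  | none => 0          -- min of the empty list raises ValueError in Python; outside Pre_
  | some m => l.sum - l.length * m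

-- ===== PRECONDITION & SPEC =====
-- excluded: the empty list, where A's check_same raises IndexError and B's min raises ValueError
def Pre_func (l : List Int) : Prop := l ≠ []
instance (l : List Int) : Decidable (Pre_func l) := by unfold Pre_func; infer_instance

def pvWitness_func : List Int := [1, 3, 2]

def Spec_func (l : List Int) (out : Int) : Prop := out = func_alt l
instance (l : List Int) (out : Int) : Decidable (Spec_func l out) := by unfold Spec_func; infer_instance

-- ===== CLAIM (what is proved, stated in full; the proofs are below) =====
def Claim_equal_func : Prop := ∀ (l : List Int), Dom_func l → Pre_func l → Spec_func l (func l)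

-- ===== LEMMAS AND PROOFS =====
lemma checkLoop_ne_zero (t : Int) (l : List Int) (h : checkLoop t l ≠ 0) :
    ∀ y ∈ l, y = t := by
  induction l with
  | nil => simp
  | cons x xs ih =>
    by_cases hx : x = t
    · simp [checkLoop, hx] at h
      intro y hy
      rcases List.mem_cons.mp hy with h0 | hy
      · exact h0.trans hx
      · exact ih h y hy
    · simp [checkLoop, hx] at h

lemma sum_const (l : List Int) (t : Int) (h : ∀ y ∈ l, y = t) :
    l.sum = l.length * t := by
  induction l with
  | nil => simp
  | cons x xs ih =>
    have hx := h x (List.mem_cons_self)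
    have := ih (fun y hy => h y (List.mem_cons_of_mem _ hy))
    simp only [List.sum_cons, List.length_cons, hx, this]
    push_cast
    ring

lemma funcLoop_eq (k : Nat) : ∀ (l : List Int) (hv turns : Int), meas l = k → l ≠ [] →
    funcLoop l hv turns = turns + (l.sum - l.length * minHead l) := by
  induction k using Nat.strong_induction_on with
  | _ k ih =>
    intro l hv turns hk hne
    rw [funcLoop]
    split
    · next hcs =>
      split
      · next hm =>
        exact absurd ((PySem.List.max?_eq_none_iff l _).mp hm) hne
      · next mx hm =>
        split
        · next hi =>
          exfalso
          have hs := (PySem.List.index?_isSome_iff l mx).mpr (PySem.List.max?_mem hm)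
          rw [hi] at hs
          simp at hs
        · next maxe hi =>
          obtain ⟨h1, h2, h3⟩ := step_facts l hcs mx maxe hm hi
          have hlt := meas_decrease l hcs mx maxe hm hi
          have hne' : incrExcept maxe 0 l ≠ [] := by
            have := length_incrExcept maxe 0 l
            intro h0
            rw [h0] at this
            cases l <;> simp_all
          rw [ih _ (hk ▸ hlt) _ 0 (turns + 1) rfl hne', h1, h2, length_incrExcept]
          ring
    · next hcs =>
      -- all elements equal: sum = length * min
      cases l with
      | nil => exact absurd rfl hne
      | cons x xs =>
        have ht : checkLoop x (x :: xs) ≠ 0 := by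
          simpa [checkSame, PySem.List.pyGet?_zero_cons] using hcs
        have hall := checkLoop_ne_zero x (x :: xs) ht
        have hmin : minHead (x :: xs) = x :=
          minHead_eq _ x (fun y hy => le_of_eq (hall y hy).symm) (List.mem_cons_self)
        rw [hmin, sum_const (x :: xs) x hall]
        ring

-- ===== VERDICT (by name: the statement is the Claim_ definition above) =====
theorem func_spec : Claim_equal_func := by
  intro l _ hpre
  unfold Spec_func func
  rw [funcLoop_eq (meas l) l 1 0 rfl hpre]
  cases l with
  | nil => exact absurd rfl hpre
  | cons x xs =>
    simp only [func_alt, PySem.List.min?_id_cons, minHead]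
    ring
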